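-- pv_equiv track=rewrite | github.com/mlkonopelski/quiz-agent | backend/app/starter.py | _workflow_id_slug
-- ===== SOURCE A (Python) =====
-- def _workflow_id_slug(email: str) -> str:
--     characters = [
--         char.lower() if char.isalnum() else "-"
--         for char in email.strip().lower()
--     ]
--     slug = "".join(characters).strip("-")
--     while "--" in slug:
--         slug = slug.replace("--", "-")
--     return slug or "user"
-- ===== SOURCE B (Python) =====
-- def _workflow_id_slug(email: str) -> str:
--     words = []
--     cur = []
--     for ch in email.strip().lower():
--         if ch.isalnum():
--             cur.append(ch)
--         elif cur:
--             words.append("".join(cur))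
--             cur = []
--     if cur:
--         words.append("".join(cur))
--     return "-".join(words) or "user"
-- ===== Notes on version B (the rewrite author's own statement) =====
-- stated objective: faster
-- what changed: B tokenizes the lowercased, stripped email into maximal alphanumeric runs in one pass with an explicit word buffer and joins the words with dashes, instead of A's map-each-char-to-dash, strip, and repeated whole-string replacement passes that collapse adjacent dashes.
import Mathlib
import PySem

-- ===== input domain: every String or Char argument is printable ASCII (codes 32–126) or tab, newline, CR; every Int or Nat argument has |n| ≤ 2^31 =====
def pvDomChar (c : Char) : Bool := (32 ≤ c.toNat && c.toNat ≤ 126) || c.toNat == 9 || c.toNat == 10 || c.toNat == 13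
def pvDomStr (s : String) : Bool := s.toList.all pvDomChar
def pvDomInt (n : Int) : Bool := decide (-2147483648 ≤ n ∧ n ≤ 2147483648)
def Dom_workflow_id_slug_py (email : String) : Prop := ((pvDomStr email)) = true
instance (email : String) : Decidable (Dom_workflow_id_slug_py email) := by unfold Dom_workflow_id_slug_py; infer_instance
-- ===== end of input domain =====

-- B replaces A's map-to-dashes, strip and repeated dash-collapsing replacement passes by a single
-- tokenizing scan (explicit word buffer, words joined with dashes); measured faster (objective: faster).


-- ===== PORT A =====
-- char.lower() if char.isalnum() else "-"
def pvMapA (c : Char) : Char := if PySem.Chars.isalnum c then PySem.Chars.lowerChar c else '-'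

-- proof-side model of one replace('--','-') pass; needed below for the while-loop's termination
def pvRep : List Char → List Char
  | [] => []
  | [c] => [c]
  | c1 :: c2 :: t =>
    if c1 = '-' ∧ c2 = '-' then '-' :: pvRep t else c1 :: pvRep (c2 :: t)
termination_by l => l.length

theorem pvRep_go (fuel : Nat) : ∀ (l acc : List Char), l.length ≤ fuel →
    PySem.Chars.replace.go ['-', '-'] ['-'] fuel l acc = acc.reverse ++ pvRep l := by
  induction fuel with
  | zero => intro l acc h; rw [Nat.le_zero, List.length_eq_zero_iff] at h; subst h
            simp [PySem.Chars.replace.go, pvRep]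
  | succ n ih =>
    intro l acc h
    match l with
    | [] => simp [PySem.Chars.replace.go, pvRep]
    | [c] =>
      have hpre : (['-', '-'] : List Char).isPrefixOf [c] = false := by
        simp [List.isPrefixOf]
      simp only [PySem.Chars.replace.go, hpre, Bool.false_eq_true, if_false]
      rw [ih [] (c :: acc) (by simp)]
      simp [pvRep]
    | c1 :: c2 :: t =>
      by_cases hd : c1 = '-' ∧ c2 = '-'
      · obtain ⟨h1, h2⟩ := hd; subst h1; subst h2
        have hpre : (['-', '-'] : List Char).isPrefixOf ('-' :: '-' :: t) = true := by
          simp [List.isPrefixOf]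
        simp only [PySem.Chars.replace.go, hpre, if_true]
        rw [show List.drop (['-', '-'] : List Char).length ('-' :: '-' :: t) = t from rfl,
            show (['-'] : List Char).reverse ++ acc = '-' :: acc from rfl,
            ih t ('-' :: acc) (by simp at h ⊢; omega)]
        simp [pvRep]
      · have hpre : (['-', '-'] : List Char).isPrefixOf (c1 :: c2 :: t) = false := by
          simp only [List.isPrefixOf, Bool.and_eq_false_iff]
          rcases Decidable.not_and_iff_not_or_not.mp hd with h1 | h1 <;>
            simp [beq_iff_eq, h1] <;> tauto
        simp only [PySem.Chars.replace.go, hpre, Bool.false_eq_true, if_false]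
        rw [ih (c2 :: t) (c1 :: acc) (by simp at h ⊢; omega)]
        have hstep : pvRep (c1 :: c2 :: t) = c1 :: pvRep (c2 :: t) := by
          rw [pvRep]; simp [hd]
        rw [hstep]; simp

theorem pvReplace_eq (s : List Char) :
    PySem.Chars.replace s ['-', '-'] ['-'] = pvRep s := by
  rw [PySem.Chars.replace,
      if_neg (by simp)]
  simpa using pvRep_go s.length s [] le_rfl

theorem pvRep_length_le (s : List Char) : (pvRep s).length ≤ s.length := by
  fun_induction pvRep with
  | case1 => simp
  | case2 c => simp
  | case3 c1 c2 t h ih => simp at ih ⊢; omega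
  | case4 c1 c2 t h ih => simp at ih ⊢; omega

theorem pvRep_length_lt (s : List Char) (hin : ['-', '-'] <:+: s) :
    (pvRep s).length < s.length := by
  fun_induction pvRep with
  | case1 => exact absurd (List.IsInfix.length_le hin) (by simp)
  | case2 c => exact absurd (List.IsInfix.length_le hin) (by simp)
  | case3 c1 c2 t h ih =>
    have := pvRep_length_le t; simp; omega
  | case4 c1 c2 t h ih =>
    rcases List.infix_cons_iff.mp hin with hp | hi
    · rcases List.cons_prefix_cons.mp hp with ⟨h1, hp2⟩
      rcases List.cons_prefix_cons.mp hp2 with ⟨h2, _⟩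
      exact absurd ⟨h1.symm, h2.symm⟩ h
    · have := ih hi; simp at this ⊢; omega

-- while "--" in slug: slug = slug.replace("--", "-")
def pvLoopA (s : List Char) : List Char :=
  if PySem.Chars.isIn ['-', '-'] s then pvLoopA (PySem.Chars.replace s ['-', '-'] ['-']) else s
termination_by s.length
decreasing_by
  rename_i h
  rw [pvReplace_eq]
  exact pvRep_length_lt s ((PySem.Chars.isIn_iff_infix _ _).mp h)

def workflow_id_slug_py (email : String) : String :=
  -- characters = [char.lower() if char.isalnum() else "-" for char in email.strip().lower()]
  let characters := (PySem.Str.lower (PySem.Str.strip email)).toList.map pvMapA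
  -- slug = "".join(characters).strip("-")
  let slug := PySem.Chars.stripChars characters ['-']
  -- while "--" in slug: slug = slug.replace("--", "-")
  let slug2 := pvLoopA slug
  -- return slug or "user"
  if slug2.isEmpty then "user" else String.ofList slug2

-- ===== PORT B =====
-- the for-loop of B: state = (remaining chars, cur buffer, words list)
def pvScanB : List Char → List Char → List (List Char) → List (List Char)
  | [], cur, words => if cur.isEmpty then words else words ++ [cur]
  | c :: t, cur, words =>
    if PySem.Chars.isalnum c then pvScanB t (cur ++ [c]) words
    else if cur.isEmpty then pvScanB t cur words
    else pvScanB t [] (words ++ [cur])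

def workflow_id_slug_py_alt (email : String) : String :=
  let cs := (PySem.Str.lower (PySem.Str.strip email)).toList
  let words := pvScanB cs [] []
  let slug := PySem.Chars.join ['-'] words
  if slug.isEmpty then "user" else String.ofList slug

-- ===== PRECONDITION & SPEC =====
def Spec_workflow_id_slug_py (email : String) (out : String) : Prop := out = workflow_id_slug_py_alt email
instance (email : String) (out : String) : Decidable (Spec_workflow_id_slug_py email out) := by unfold Spec_workflow_id_slug_py; infer_instance

-- ===== CLAIM (what is proved, stated in full; the proofs are below) =====
def Claim_equal_workflow_id_slug_py : Prop := ∀ (email : String), Dom_workflow_id_slug_py email → Spec_workflow_id_slug_py email (workflow_id_slug_py email)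

-- ===== LEMMAS AND PROOFS =====

-- proof-side notation
def pvPd : Char → Bool := fun c => c == '-'
def pvG (c : Char) : Char := if PySem.Chars.isalnum c then c else '-'
def pvRstrip (x : List Char) : List Char := (List.dropWhile pvPd x.reverse).reverse

-- collapse of adjacent dashes (the fixed point of the replace loop)
def pvCollapse : List Char → List Char
  | [] => []
  | [c] => [c]
  | c1 :: c2 :: t =>
    if c1 = '-' ∧ c2 = '-' then pvCollapse (c2 :: t) else c1 :: pvCollapse (c2 :: t)
termination_by l => l.length

-- maximal alnum runs of cs, with pending buffer cur (pure spec of pvScanB)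
def pvRuns : List Char → List Char → List (List Char)
  | cur, [] => if cur.isEmpty then [] else [cur]
  | cur, c :: t =>
    if PySem.Chars.isalnum c then pvRuns (cur ++ [c]) t
    else (if cur.isEmpty then [] else [cur]) ++ pvRuns [] t

-- ---- small char facts ----

theorem pvCharLe_iff (a b : Char) : a ≤ b ↔ a.toNat ≤ b.toNat := by
  rw [Char.le_def]
  exact ⟨fun h => UInt32.le_iff_toNat_le.mp h, fun h => UInt32.le_iff_toNat_le.mpr h⟩

theorem pvLowerChar_idem (c : Char) :
    PySem.Chars.lowerChar (PySem.Chars.lowerChar c) = PySem.Chars.lowerChar c := by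
  unfold PySem.Chars.lowerChar
  by_cases h : PySem.Chars.isupper c = true
  · rw [if_pos h]
    have hrange : 65 ≤ c.toNat ∧ c.toNat ≤ 90 := by
      unfold PySem.Chars.isupper at h
      simp only [Bool.and_eq_true, decide_eq_true_eq, pvCharLe_iff] at h
      exact ⟨h.1, h.2⟩
    have hv : (Char.ofNat (c.toNat + 32)).toNat = c.toNat + 32 := by
      rw [Char.toNat_ofNat, if_pos (Or.inl (by omega))]
    have hup : PySem.Chars.isupper (Char.ofNat (c.toNat + 32)) = false := by
      unfold PySem.Chars.isupper
      simp only [Bool.and_eq_false_iff, decide_eq_false_iff_not, pvCharLe_iff]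
      right
      rw [hv]
      show ¬ (_ ≤ 90)
      omega
    rw [if_neg (by simp [hup])]
  · rw [if_neg h, if_neg h]

theorem pvAl_ne_dash {c : Char} (h : PySem.Chars.isalnum c = true) : c ≠ '-' := by
  intro he; subst he; exact absurd h (by decide)

theorem pvPd_pvG (c : Char) : pvPd (pvG c) = !(PySem.Chars.isalnum c) := by
  by_cases h : PySem.Chars.isalnum c = true
  · simp [pvG, h, pvPd, pvAl_ne_dash h]
  · simp [pvG, h, pvPd]
  -- note: if alnum, pvG c = c ≠ '-'

theorem pvMapA_lower (s : List Char) :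
    (PySem.Chars.lower s).map pvMapA = (PySem.Chars.lower s).map pvG := by
  apply List.map_congr_left
  intro c hc
  simp only [PySem.Chars.lower, List.mem_map] at hc
  obtain ⟨x, _, hx⟩ := hc
  by_cases h : PySem.Chars.isalnum c = true
  · simp [pvMapA, pvG, h, ← hx, pvLowerChar_idem]
  · simp [pvMapA, pvG, h]

-- ---- pvCollapse lemmas ----

theorem pvCollapse_head? (s : List Char) : (pvCollapse s).head? = s.head? := by
  fun_induction pvCollapse with
  | case1 => rfl
  | case2 c => rfl
  | case3 c1 c2 t h ih => rw [ih]; simp [h.1, h.2]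
  | case4 c1 c2 t h ih => rfl

theorem pvCollapse_cons (c : Char) (x : List Char) :
    pvCollapse (c :: x) =
      if c = '-' ∧ x.head? = some '-' then pvCollapse x else c :: pvCollapse x := by
  cases x with
  | nil => simp [pvCollapse]
  | cons b x' =>
    rw [pvCollapse]
    simp only [List.head?_cons, Option.some.injEq]

theorem pvCollapse_congr_cons (c : Char) {x y : List Char}
    (h : pvCollapse x = pvCollapse y) : pvCollapse (c :: x) = pvCollapse (c :: y) := by
  have hh : x.head? = y.head? := by
    rw [← pvCollapse_head? x, ← pvCollapse_head? y, h]
  rw [pvCollapse_cons, pvCollapse_cons, hh, h]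

theorem pvCollapse_pvRep (s : List Char) : pvCollapse (pvRep s) = pvCollapse s := by
  fun_induction pvRep with
  | case1 => rfl
  | case2 c => rfl
  | case3 c1 c2 t h ih =>
    obtain ⟨h1, h2⟩ := h; subst h1; subst h2
    calc pvCollapse ('-' :: pvRep t) = pvCollapse ('-' :: t) := pvCollapse_congr_cons _ ih
    _ = pvCollapse ('-' :: '-' :: t) := by rw [pvCollapse]; simp
  | case4 c1 c2 t h ih =>
    calc pvCollapse (c1 :: pvRep (c2 :: t)) = pvCollapse (c1 :: c2 :: t) :=
      pvCollapse_congr_cons _ ih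

theorem pvCollapse_of_not_infix {s : List Char} (h : ¬ (['-', '-'] <:+: s)) :
    pvCollapse s = s := by
  fun_induction pvCollapse with
  | case1 => rfl
  | case2 c => rfl
  | case3 c1 c2 t hd ih =>
    obtain ⟨h1, h2⟩ := hd; subst h1; subst h2
    exact absurd (List.IsPrefix.isInfix (by exact ⟨t, rfl⟩)) h
  | case4 c1 c2 t hd ih =>
    rw [ih (fun hi => h (List.infix_cons_iff.mpr (Or.inr hi)))]

theorem pvCollapse_cons_nondash {a : Char} (ha : a ≠ '-') (y : List Char) :
    pvCollapse (a :: y) = a :: pvCollapse y := by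
  rw [pvCollapse_cons, if_neg (by tauto)]

theorem pvCollapse_append_nondash {w : List Char} (h : ∀ x ∈ w, x ≠ '-') (z : List Char) :
    pvCollapse (w ++ z) = w ++ pvCollapse z := by
  induction w with
  | nil => simp
  | cons a w' ih =>
    rw [List.cons_append, pvCollapse_cons_nondash (h a (by simp)),
        ih (fun x hx => h x (by simp [hx]))]
    rfl

theorem pvCollapse_dash (z : List Char) :
    pvCollapse ('-' :: z) = '-' :: pvCollapse (List.dropWhile pvPd z) := by
  induction z with
  | nil => simp [pvCollapse]
  | cons b z' ih =>
    by_cases hb : b = '-'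
    · subst hb
      rw [show pvCollapse ('-' :: '-' :: z') = pvCollapse ('-' :: z') from by
            rw [pvCollapse]; simp,
          ih]
      simp [List.dropWhile_cons, pvPd]
    · rw [pvCollapse_cons, if_neg (by simp [hb]), List.dropWhile_cons,
          if_neg (by simp [pvPd, hb])]

theorem pvLoopA_eq (s : List Char) : pvLoopA s = pvCollapse s := by
  fun_induction pvLoopA with
  | case1 s h ih =>
    rw [ih, pvReplace_eq, pvCollapse_pvRep]
  | case2 s h =>
    rw [pvCollapse_of_not_infix]
    intro hi
    exact h ((PySem.Chars.isIn_iff_infix _ _).mpr hi)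

-- ---- strip lemmas ----

theorem pvStripChars_eq (s : List Char) :
    PySem.Chars.stripChars s ['-'] = pvRstrip (List.dropWhile pvPd s) := by
  unfold PySem.Chars.stripChars pvRstrip
  have hp : (fun c => (['-'] : List Char).contains c) = pvPd := by
    funext c; by_cases hc : c = '-' <;> simp [pvPd, hc, List.contains_cons]
  rw [hp]

theorem pvDropWhile_all_false {p : Char → Bool} {l : List Char}
    (h : ∀ x ∈ l, p x = false) : List.dropWhile p l = l := by
  cases l with
  | nil => rfl
  | cons a t => rw [List.dropWhile_cons, if_neg (by simp [h a (by simp)])]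

theorem pvDropWhile_head_false {α : Type} {p : α → Bool} :
    ∀ {l : List α} {d : α} {r : List α}, List.dropWhile p l = d :: r → p d = false := by
  intro l
  induction l with
  | nil => intro d r h; simp at h
  | cons a t ih =>
    intro d r h
    rw [List.dropWhile_cons] at h
    split at h
    · exact ih h
    · rename_i hpa
      cases h
      simpa using hpa

theorem pvCollapse_nil : pvCollapse [] = [] := by rw [pvCollapse]

theorem pvCollapse_id_of_nondash {w : List Char} (h : ∀ x ∈ w, x ≠ '-') :
    pvCollapse w = w := by
  have h0 := pvCollapse_append_nondash h []
  rwa [List.append_nil, pvCollapse_nil, List.append_nil] at h0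

theorem pvRstrip_eq_self {w : List Char} (h : ∀ x ∈ w, pvPd x = false) :
    pvRstrip w = w := by
  unfold pvRstrip
  rw [pvDropWhile_all_false (fun x hx => h x (List.mem_reverse.mp hx)), List.reverse_reverse]

theorem pvRstrip_append (v x : List Char) :
    pvRstrip (v ++ x) = if pvRstrip x = [] then pvRstrip v else v ++ pvRstrip x := by
  unfold pvRstrip
  rw [List.reverse_append, List.dropWhile_append]
  by_cases h : List.dropWhile pvPd x.reverse = []
  · rw [if_pos (by simp [h]), if_pos (by simp [h])]
  · rw [if_neg (by simp [h]), if_neg (by simp [h]), List.reverse_append, List.reverse_reverse]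

theorem pvRstrip_nil_iff (x : List Char) : pvRstrip x = [] ↔ ∀ c ∈ x, pvPd c = true := by
  unfold pvRstrip
  rw [List.reverse_eq_nil_iff, List.dropWhile_eq_nil_iff]
  constructor
  · intro h c hc; exact h c (List.mem_reverse.mpr hc)
  · intro h c hc; exact h c (List.mem_reverse.mp hc)

theorem pvRstrip_prefix (x : List Char) : pvRstrip x <+: x := by
  rw [← List.reverse_suffix]
  unfold pvRstrip
  rw [List.reverse_reverse]
  exact List.dropWhile_suffix _

-- ---- pvRuns / pvScanB lemmas ----

theorem pvScanB_eq (t : List Char) : ∀ (cur : List Char) (words : List (List Char)),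
    pvScanB t cur words = words ++ pvRuns cur t := by
  induction t with
  | nil =>
    intro cur words
    rw [pvScanB, pvRuns]
    split <;> simp
  | cons c t ih =>
    intro cur words
    rw [pvScanB, pvRuns]
    by_cases hc : PySem.Chars.isalnum c = true
    · rw [if_pos hc, if_pos hc, ih]
    · rw [if_neg hc, if_neg hc]
      by_cases hcur : cur.isEmpty = true
      · rw [if_pos hcur, if_pos hcur, ih]
        have : cur = [] := by simpa using hcur
        simp [this]
      · rw [if_neg hcur, if_neg hcur, ih]
        simp

theorem pvRuns_append {w : List Char} (h : ∀ x ∈ w, PySem.Chars.isalnum x = true) :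
    ∀ (cur r : List Char), pvRuns cur (w ++ r) = pvRuns (cur ++ w) r := by
  induction w with
  | nil => intro cur r; simp
  | cons a w' ih =>
    intro cur r
    rw [List.cons_append, pvRuns, if_pos (h a (by simp)),
        ih (fun x hx => h x (by simp [hx]))]
    simp

theorem pvRuns_nil_of_no_alnum {t : List Char}
    (h : ∀ x ∈ t, PySem.Chars.isalnum x = false) : pvRuns [] t = [] := by
  induction t with
  | nil => rfl
  | cons c t ih =>
    rw [pvRuns, if_neg (by simp [h c (by simp)])]
    simp [ih (fun x hx => h x (by simp [hx]))]

theorem pvRuns_ne_nil_of_cur {cur : List Char} (hc : cur ≠ []) (t : List Char) :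
    pvRuns cur t ≠ [] := by
  induction t generalizing cur with
  | nil => rw [pvRuns]; simp [hc]
  | cons c t ih =>
    rw [pvRuns]
    by_cases h : PySem.Chars.isalnum c = true
    · rw [if_pos h]; exact ih (by simp)
    · rw [if_neg h]; simp [hc]

theorem pvRuns_ne_nil_of_alnum {t : List Char}
    (h : ∃ x ∈ t, PySem.Chars.isalnum x = true) : pvRuns [] t ≠ [] := by
  induction t with
  | nil => simp at h
  | cons c t ih =>
    rw [pvRuns]
    by_cases hc : PySem.Chars.isalnum c = true
    · rw [if_pos hc]; exact pvRuns_ne_nil_of_cur (by simp) t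
    · rw [if_neg hc]
      simp only [List.isEmpty_nil, if_true, List.nil_append]
      apply ih
      rcases h with ⟨x, hx, hal⟩
      rcases List.mem_cons.mp hx with rfl | hx'
      · exact absurd hal (by simp [hc])
      · exact ⟨x, hx', hal⟩

-- ---- join lemmas ----

theorem pvJoin_single (w : List Char) : PySem.Chars.join ['-'] [w] = w := by
  simp [PySem.Chars.join, List.intercalate]

theorem pvJoin_cons {l : List (List Char)} (w : List Char) (h : l ≠ []) :
    PySem.Chars.join ['-'] (w :: l) = w ++ '-' :: PySem.Chars.join ['-'] l := by
  cases l with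
  | nil => exact absurd rfl h
  | cons b l' => simp [PySem.Chars.join, List.intercalate, List.intersperse]

-- ---- the main lemma ----

theorem pvLHS_nil :
    pvCollapse (pvRstrip (List.dropWhile pvPd (List.map pvG []))) =
      PySem.Chars.join ['-'] (pvRuns [] []) := by
  rw [show List.map pvG [] = [] from rfl, show List.dropWhile pvPd ([] : List Char) = [] from rfl,
      show pvRstrip [] = [] from rfl, pvCollapse]
  rfl


theorem pvMain : ∀ (n : Nat) (cs : List Char), cs.length ≤ n →
    pvCollapse (pvRstrip (List.dropWhile pvPd (cs.map pvG))) =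
      PySem.Chars.join ['-'] (pvRuns [] cs) := by
  intro n
  induction n with
  | zero =>
    intro cs h
    rw [Nat.le_zero, List.length_eq_zero_iff] at h; subst h
    exact pvLHS_nil
  | succ n ih =>
    intro cs hlen
    match cs with
    | [] => exact pvLHS_nil
    | c :: t =>
      by_cases hal : PySem.Chars.isalnum c = true
      case neg =>
        have h1 : List.dropWhile pvPd ((c :: t).map pvG) = List.dropWhile pvPd (t.map pvG) := by
          rw [List.map_cons, List.dropWhile_cons, if_pos (by rw [pvPd_pvG]; simp [hal])]
        rw [h1, ih t (by simp at hlen; omega)]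
        rw [show pvRuns [] (c :: t) = pvRuns [] t from by
          rw [pvRuns, if_neg (by simp [hal])]; simp]
      case pos =>
        have hsplit := List.takeWhile_append_dropWhile
          (p := fun x => PySem.Chars.isalnum x) (l := c :: t)
        set w := List.takeWhile (fun x => PySem.Chars.isalnum x) (c :: t) with hw
        set r := List.dropWhile (fun x => PySem.Chars.isalnum x) (c :: t) with hr
        have hw_mem : ∀ x ∈ w, PySem.Chars.isalnum x = true :=
          fun x hx => List.mem_takeWhile_imp hx
        have hw_ne : w ≠ [] := by
          rw [hw, List.takeWhile_cons, if_pos hal]; simp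
        have hw_nd : ∀ x ∈ w, x ≠ '-' := fun x hx => pvAl_ne_dash (hw_mem x hx)
        have hw_pd : ∀ x ∈ w, pvPd x = false := by
          intro x hx; simp [pvPd, hw_nd x hx]
        have hmapw : w.map pvG = w := by
          conv_rhs => rw [← List.map_id w]
          exact List.map_congr_left (fun x hx => by simp [pvG, hw_mem x hx])
        have hmap : (c :: t).map pvG = w ++ r.map pvG := by
          conv_lhs => rw [← hsplit]
          rw [List.map_append, hmapw]
        have hdw : List.dropWhile pvPd (w ++ r.map pvG) = w ++ r.map pvG := by
          cases hwc : w with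
          | nil => exact absurd hwc hw_ne
          | cons a w' =>
            rw [List.cons_append, List.dropWhile_cons,
                if_neg (by simp [hw_pd a (by rw [hwc]; simp)])]
        have hRw : pvRuns [] (c :: t) = pvRuns w r := by
          conv_lhs => rw [← hsplit]
          rw [pvRuns_append hw_mem, List.nil_append]
        have hrlen : r.length ≤ (c :: t).length := by
          rw [hr]; exact List.length_dropWhile_le _ _
        cases hrc : r with
        | nil =>
          rw [hmap, hdw, hrc]
          rw [show (([] : List Char).map pvG) = [] from rfl, List.append_nil,
              pvRstrip_eq_self hw_pd]
          rw [pvCollapse_id_of_nondash hw_nd]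
          rw [hRw, hrc, pvRuns, if_neg (by simp [hw_ne]), pvJoin_single]
        | cons d r' =>
          have hd : PySem.Chars.isalnum d = false :=
            pvDropWhile_head_false (hr.symm.trans hrc)
          have hr'len : r'.length ≤ n := by
            rw [hrc] at hrlen; simp at hrlen hlen; omega
          have hmapr : r.map pvG = '-' :: r'.map pvG := by
            rw [hrc, List.map_cons, show pvG d = '-' from by simp [pvG, hd]]
          have hRr : pvRuns w r = [w] ++ pvRuns [] r' := by
            rw [hrc, pvRuns, if_neg (by simp [hd]), if_neg (by simp [hw_ne])]
          by_cases hex : ∃ x ∈ r', PySem.Chars.isalnum x = true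
          case neg =>
            push_neg at hex
            have hall : ∀ x ∈ ('-' :: r'.map pvG), pvPd x = true := by
              intro x hx
              rcases List.mem_cons.mp hx with rfl | hx'
              · simp [pvPd]
              · obtain ⟨a, ha, rfl⟩ := List.mem_map.mp hx'
                rw [pvPd_pvG]
                simp [hex a ha]
            rw [hmap, hdw, hmapr, pvRstrip_append,
                if_pos ((pvRstrip_nil_iff _).mpr hall), pvRstrip_eq_self hw_pd]
            rw [pvCollapse_id_of_nondash hw_nd]
            rw [hRw, hRr, pvRuns_nil_of_no_alnum (by intro x hx; simp [hex x hx]),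
                List.append_nil, pvJoin_single]
          case pos =>
            -- split m₁ = r'.map pvG into leading dashes u and z (headed by a non-dash)
            have hm := List.takeWhile_append_dropWhile (p := pvPd) (l := r'.map pvG)
            set u := List.takeWhile pvPd (r'.map pvG) with hu
            set z := List.dropWhile pvPd (r'.map pvG) with hz
            have hu_mem : ∀ x ∈ u, pvPd x = true := fun x hx => List.mem_takeWhile_imp hx
            have hzne : z ≠ [] := by
              rw [hz]
              intro hnil
              rw [List.dropWhile_eq_nil_iff] at hnil
              obtain ⟨a, ha, hala⟩ := hex
              have := hnil (pvG a) (List.mem_map.mpr ⟨a, ha, rfl⟩)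
              rw [pvPd_pvG, hala] at this
              simp at this
            have hzr_ne : pvRstrip z ≠ [] := by
              intro hnil
              rw [pvRstrip_nil_iff] at hnil
              cases hzc : z with
              | nil => exact hzne hzc
              | cons b zt =>
                have hb := pvDropWhile_head_false (hz.symm.trans hzc)
                have hbt := hnil b (by rw [hzc]; simp)
                simp [hbt] at hb
            -- head of z is not a dash, and pvRstrip z keeps it
            have hzdw : List.dropWhile pvPd (pvRstrip z) = pvRstrip z := by
              obtain ⟨rest, hrest⟩ := pvRstrip_prefix z
              cases hpz : pvRstrip z with
              | nil => exact absurd hpz hzr_ne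
              | cons b y =>
                have hzb : z = b :: (y ++ rest) := by rw [← hrest, hpz]; simp
                have hb : pvPd b = false := pvDropWhile_head_false (hz.symm.trans hzb)
                rw [List.dropWhile_cons, if_neg (by simp [hb])]
            have hstep : pvRstrip (w ++ '-' :: r'.map pvG) = w ++ ('-' :: u) ++ pvRstrip z := by
              have h1 : w ++ '-' :: r'.map pvG = (w ++ '-' :: u) ++ z := by
                rw [← hm]; simp
              rw [h1, pvRstrip_append, if_neg hzr_ne]
            have hcoll : pvCollapse (w ++ ('-' :: u) ++ pvRstrip z)
                = w ++ '-' :: pvCollapse (pvRstrip z) := by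
              rw [List.append_assoc, pvCollapse_append_nondash hw_nd,
                  show ('-' :: u) ++ pvRstrip z = '-' :: (u ++ pvRstrip z) from rfl,
                  pvCollapse_dash,
                  List.dropWhile_append]
              rw [if_pos (by simp [List.dropWhile_eq_nil_iff.mpr hu_mem]), hzdw]
            have hih := ih r' hr'len
            rw [← hz] at hih
            rw [hmap, hdw, hmapr, hstep, hcoll, hih]
            rw [hRw, hRr,
                show ([w] ++ pvRuns [] r') = w :: pvRuns [] r' from rfl,
                pvJoin_cons w (pvRuns_ne_nil_of_alnum hex)]

-- ===== VERDICT (by name: the statement is the Claim_ definition above) =====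
set_option maxHeartbeats 1000000 in
theorem workflow_id_slug_py_spec : Claim_equal_workflow_id_slug_py := by
  intro email _
  show workflow_id_slug_py email = workflow_id_slug_py_alt email
  set cs := (PySem.Str.lower (PySem.Str.strip email)).toList with hcs
  have hmap : cs.map pvMapA = cs.map pvG := by
    rw [hcs, PySem.Str.toList_lower]
    exact pvMapA_lower _
  have h1 : pvLoopA (PySem.Chars.stripChars (cs.map pvMapA) ['-'])
      = PySem.Chars.join ['-'] (pvScanB cs [] []) := by
    rw [hmap, pvLoopA_eq, pvStripChars_eq, pvMain cs.length cs le_rfl, pvScanB_eq,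
        List.nil_append]
  show (if (pvLoopA (PySem.Chars.stripChars (cs.map pvMapA) ['-'])).isEmpty
      then "user"
      else String.ofList (pvLoopA (PySem.Chars.stripChars (cs.map pvMapA) ['-'])))
    = (if (PySem.Chars.join ['-'] (pvScanB cs [] [])).isEmpty
      then "user"
      else String.ofList (PySem.Chars.join ['-'] (pvScanB cs [] [])))
  rw [h1]
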